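-- pv_equiv track=rewrite | github.com/maxserovv/phdictionary | purifier.py | purify
-- ===== SOURCE A (Python) =====
-- def purify(a):
--     try:
--         purified = ''
--         add = False
--         for i in range(len(a)):
--             if a[i] == '>':
--                 add = True
--             elif a[i] == '<':
--                 add = False
--             elif a[i] == '\n':
--                 pass
--             elif add:
--                 purified += a[i]
--         if purified[0] == ' ':
--             purified = purified[1:]
--         return purified
--     except:
--         return ''
-- ===== SOURCE B (Python) =====
-- def purify(a):
--     parts = a.split('>')[1:]
--     text = ''.join(p.split('<')[0] for p in parts)
--     text = text.replace('\n', '')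
--     if text[:1] == ' ':
--         text = text[1:]
--     return text
-- ===== Notes on version B (the rewrite author's own statement) =====
-- stated objective: faster
-- what changed: Replaces A's per-character boolean state machine (a flag toggled by the angle-bracket markers, with quadratic string concatenation) with a split-based decomposition: split on the opening marker, take each piece's part before its first closing marker, join, delete newlines, then drop one leading space.
import Mathlib
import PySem

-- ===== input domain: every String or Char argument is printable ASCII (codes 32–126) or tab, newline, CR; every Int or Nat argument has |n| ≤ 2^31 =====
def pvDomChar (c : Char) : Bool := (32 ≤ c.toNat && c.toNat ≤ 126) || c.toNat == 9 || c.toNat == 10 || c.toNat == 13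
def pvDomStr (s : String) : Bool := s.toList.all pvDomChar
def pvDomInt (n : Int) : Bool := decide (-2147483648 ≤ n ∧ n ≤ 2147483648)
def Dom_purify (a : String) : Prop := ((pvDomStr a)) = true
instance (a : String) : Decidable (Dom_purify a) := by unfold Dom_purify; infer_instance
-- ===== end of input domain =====

-- B replaces A's per-character state machine (with quadratic string concatenation) by a linear split-based decomposition (objective: faster, measured).

-- ===== PORT A =====
-- the for-loop over the characters, carrying (purified, add); purified += a[i] is acc ++ [c]
def purifyLoop (l : List Char) (st : List Char × Bool) : List Char × Bool :=
  match l with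
  | [] => st
  | c :: cs =>
      purifyLoop cs
        (if c = '>' then (st.1, true)
         else if c = '<' then (st.1, false)
         else if c = '\n' then st
         else if st.2 then (st.1 ++ [c], st.2) else st)

def purify (a : String) : String :=
  let purified := (purifyLoop a.toList ([], false)).1
  -- 'purified[0]' raises IndexError on the empty string; the bare except returns ''
  match PySem.List.pyGet? purified 0 with
  | none => ""
  | some c => if c = ' ' then String.mk (PySem.List.slice purified (some 1) none) else String.mk purified

-- ===== PORT B =====
-- hand port of Python str.split(sep) for a one-character separator (exact: keeps empty fields)
def splitCh (sep : Char) (l : List Char) : List (List Char) :=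
  match l with
  | [] => [[]]
  | c :: cs =>
      match splitCh sep cs with
      | [] => [[]]  -- unreachable: splitCh never returns []
      | s :: rest => if c = sep then [] :: s :: rest else (c :: s) :: rest

def purify_alt (a : String) : String :=
  let parts := (splitCh '>' a.toList).tail                          -- a.split('>')[1:]
  let text := parts.flatMap (fun p => (splitCh '<' p).headD [])     -- ''.join(p.split('<')[0] for p in parts)
  let text := text.filter (fun c => c ≠ '\n')                       -- text.replace('\n','')
  let text := if PySem.List.slice text none (some 1) = [' '] then   -- if text[:1] == ' ':
      PySem.List.slice text (some 1) none                             --     text = text[1:]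
    else text
  String.mk text

-- ===== PRECONDITION & SPEC =====
def Spec_purify (a : String) (out : String) : Prop := out = purify_alt a
instance (a : String) (out : String) : Decidable (Spec_purify a out) := by unfold Spec_purify; infer_instance

-- ===== CLAIM (what is proved, stated in full; the proofs are below) =====
def Claim_equal_purify : Prop := ∀ (a : String), Dom_purify a → Spec_purify a (purify a)

-- ===== LEMMAS AND PROOFS =====

-- accumulator-free form of A's loop
def collect : List Char → Bool → List Char
  | [], _ => []
  | c :: cs, add =>
      if c = '>' then collect cs true
      else if c = '<' then collect cs false
      else if c = '\n' then collect cs add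
      else if add then c :: collect cs add else collect cs add

theorem purifyLoop_fst (l : List Char) : ∀ acc add, (purifyLoop l (acc, add)).1 = acc ++ collect l add := by
  induction l with
  | nil => intro acc add; simp [purifyLoop, collect]
  | cons c cs ih =>
      intro acc add
      by_cases h1 : c = '>'
      · simp [purifyLoop, collect, h1, ih]
      · by_cases h2 : c = '<'
        · simp [purifyLoop, collect, h1, h2, ih]
        · by_cases h3 : c = '\n'
          · simp [purifyLoop, collect, h1, h2, h3, ih]
          · cases add <;> simp [purifyLoop, collect, h1, h2, h3, ih]

theorem splitCh_ne_nil (sep : Char) (l : List Char) : splitCh sep l ≠ [] := by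
  cases l with
  | nil => simp [splitCh]
  | cons c cs =>
      simp only [splitCh]
      split
      · simp
      · split <;> simp

-- first field of split = takeWhile (≠ sep)
theorem splitCh_head (sep : Char) (l : List Char) :
    (splitCh sep l).headD [] = l.takeWhile (fun c => c ≠ sep) := by
  induction l with
  | nil => simp [splitCh]
  | cons c cs ih =>
      rcases h : splitCh sep cs with _ | ⟨s, rest⟩
      · exact absurd h (splitCh_ne_nil sep cs)
      · rw [h] at ih
        simp only [List.headD_cons] at ih
        by_cases hc : c = sep
        · simp [splitCh, h, hc, List.takeWhile_cons]
        · simp [splitCh, h, hc, List.takeWhile_cons, ih]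

-- the key correspondence: the state machine = split decomposition
theorem collect_eq_split (l : List Char) (add : Bool) :
    collect l add =
      ((if add then splitCh '>' l else (splitCh '>' l).tail).flatMap
        (fun p => p.takeWhile (fun c => c ≠ '<'))).filter (fun c => c ≠ '\n') := by
  induction l generalizing add with
  | nil => cases add <;> simp [collect, splitCh]
  | cons c cs ih =>
      rcases h : splitCh '>' cs with _ | ⟨s, rest⟩
      · exact absurd h (splitCh_ne_nil '>' cs)
      · have ihT := ih true
        have ihF := ih false
        rw [h] at ihT ihF
        simp only [if_pos rfl, List.tail_cons] at ihT ihF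
        by_cases h1 : c = '>'
        · subst h1
          cases add <;>
            simp [collect, splitCh, h, ihT, List.filter_append]
        · by_cases h2 : c = '<'
          · subst h2
            cases add <;>
              simp [collect, splitCh, h, h1, ihF, List.takeWhile_cons, List.filter_append]
          · by_cases h3 : c = '\n'
            · subst h3
              cases add <;>
                simp [collect, splitCh, h, h1, h2, ihT, ihF, List.takeWhile_cons,
                  List.filter_append]
            · cases add <;>
                simp [collect, splitCh, h, h1, h2, h3, ihT, ihF, List.takeWhile_cons,
                  List.filter_append]

-- ===== VERDICT (by name: the statement is the Claim_ definition above) =====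
theorem purify_spec : Claim_equal_purify := by
  intro a _
  unfold Spec_purify purify purify_alt
  have hloop := purifyLoop_fst a.toList [] false
  simp only [List.nil_append] at hloop
  rw [hloop]
  have hc := collect_eq_split a.toList false
  simp only [Bool.false_eq_true, if_false] at hc
  have hhead : ∀ p : List Char, (splitCh '<' p).headD [] = p.takeWhile (fun c => c ≠ '<') :=
    fun p => splitCh_head '<' p
  simp only [hc, hhead]
  set t := ((splitCh '>' a.toList).tail.flatMap
      (fun p => p.takeWhile (fun c => decide (c ≠ '<')))).filter (fun c => decide (c ≠ '\n'))
    with ht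
  clear_value t
  rcases t with _ | ⟨c, rest⟩
  · simp [PySem.List.pyGet?, PySem.List.slice]
    rfl
  · by_cases hc' : c = ' '
    · subst hc'
      simp [PySem.List.pyGet?_zero_cons, PySem.List.slice_from_one, PySem.List.slice]
    · simp [PySem.List.pyGet?_zero_cons, hc', PySem.List.slice]
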